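-- pv_equiv track=rewrite | github.com/KasparsRevins/Learning-Python | Python Programming Exercises, Gently Explained/Buy_8_Get_1_Free.py | getCostOfCoffee
-- ===== SOURCE A (Python) =====
-- def getCostOfCoffee(numberOfCoffees, pricePerCoffee):
--     price = 0
--     cups = 8
--     while numberOfCoffees != 0:
--         numberOfCoffees -= 1
--         if cups == 0:
--             cups = 8
--         else:
--             price += pricePerCoffee
--             cups -= 1
--     return price
-- ===== SOURCE B (Python) =====
-- def getCostOfCoffee(numberOfCoffees, pricePerCoffee):
--     # closed form: every 9th coffee is free
--     return (numberOfCoffees - numberOfCoffees // 9) * pricePerCoffee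
-- ===== Notes on version B (the rewrite author's own statement) =====
-- stated objective: faster
-- what changed: Replaces the cup-by-cup counting loop with the closed form (n - n//9) * price, since exactly every 9th coffee is free.
-- outside the precondition, e.g. on getCostOfCoffee(-1, 5): A does not finish within the time limit, B returns 0
import Mathlib
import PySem

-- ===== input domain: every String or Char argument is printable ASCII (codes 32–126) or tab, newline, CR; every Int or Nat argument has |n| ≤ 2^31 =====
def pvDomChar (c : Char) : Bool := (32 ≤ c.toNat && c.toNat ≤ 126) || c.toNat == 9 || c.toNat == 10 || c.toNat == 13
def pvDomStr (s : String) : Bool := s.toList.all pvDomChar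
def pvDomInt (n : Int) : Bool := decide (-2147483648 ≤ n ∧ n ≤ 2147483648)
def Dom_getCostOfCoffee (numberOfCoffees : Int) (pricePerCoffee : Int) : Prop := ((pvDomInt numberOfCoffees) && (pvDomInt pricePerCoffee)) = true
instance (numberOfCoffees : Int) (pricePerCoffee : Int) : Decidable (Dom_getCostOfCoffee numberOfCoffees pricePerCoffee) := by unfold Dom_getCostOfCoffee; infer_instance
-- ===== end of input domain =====

-- B replaces A's per-cup counting loop with the closed form (n - n//9) * price (every 9th coffee free): O(1) vs O(n).

-- ===== PORT A =====
-- A's while-loop, counting numberOfCoffees down; state = (price, cups).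
-- For negative numberOfCoffees the Python loop never terminates (excluded by Pre_),
-- so the port recurses on numberOfCoffees.toNat.
def getCostOfCoffeeLoop (n : Nat) (pricePerCoffee : Int) (price : Int) (cups : Int) : Int :=
  match n with
  | 0 => price
  | Nat.succ k =>
    if cups = 0 then
      getCostOfCoffeeLoop k pricePerCoffee price 8
    else
      getCostOfCoffeeLoop k pricePerCoffee (price + pricePerCoffee) (cups - 1)

def getCostOfCoffee (numberOfCoffees : Int) (pricePerCoffee : Int) : Int :=
  getCostOfCoffeeLoop numberOfCoffees.toNat pricePerCoffee 0 8

-- ===== PORT B =====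
def getCostOfCoffee_alt (numberOfCoffees : Int) (pricePerCoffee : Int) : Int :=
  (numberOfCoffees - PySem.Int.floordiv numberOfCoffees 9) * pricePerCoffee

-- ===== PRECONDITION & SPEC =====
-- Pre_ excludes negative numberOfCoffees, on which A's while-loop never terminates.
def Pre_getCostOfCoffee (numberOfCoffees : Int) (pricePerCoffee : Int) : Prop :=
  0 ≤ numberOfCoffees
instance (numberOfCoffees : Int) (pricePerCoffee : Int) : Decidable (Pre_getCostOfCoffee numberOfCoffees pricePerCoffee) := by unfold Pre_getCostOfCoffee; infer_instance

def pvWitness_getCostOfCoffee : Int × Int := (10, 3)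

def Spec_getCostOfCoffee (numberOfCoffees : Int) (pricePerCoffee : Int) (out : Int) : Prop := out = getCostOfCoffee_alt numberOfCoffees pricePerCoffee
instance (numberOfCoffees : Int) (pricePerCoffee : Int) (out : Int) : Decidable (Spec_getCostOfCoffee numberOfCoffees pricePerCoffee out) := by unfold Spec_getCostOfCoffee; infer_instance

-- ===== CLAIM (what is proved, stated in full; the proofs are below) =====
def Claim_equal_getCostOfCoffee : Prop := ∀ (numberOfCoffees : Int) (pricePerCoffee : Int), Dom_getCostOfCoffee numberOfCoffees pricePerCoffee → Pre_getCostOfCoffee numberOfCoffees pricePerCoffee → Spec_getCostOfCoffee numberOfCoffees pricePerCoffee (getCostOfCoffee numberOfCoffees pricePerCoffee)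

-- ===== LEMMAS AND PROOFS =====

-- Loop invariant: with c cups left before the next free one (0 ≤ c ≤ 8), the
-- remaining k coffees add k minus the number of free ones, (k + (8 - c)) / 9, paid cups.
theorem getCostOfCoffeeLoop_eq (k : Nat) (p price : Int) :
    ∀ c : Nat, c ≤ 8 →
      getCostOfCoffeeLoop k p price (c : Int)
        = price + ((k : Int) - ((k + (8 - c)) / 9 : Nat)) * p := by
  induction k generalizing price with
  | zero =>
    intro c hc
    simp [getCostOfCoffeeLoop]
    omega
  | succ k ih =>
    intro c hc
    by_cases h0 : c = 0
    · subst h0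
      have h8 := ih (price := price) 8 (by omega)
      rw [show (((8 : Nat)) : Int) = (8 : Int) by norm_num] at h8
      simp only [getCostOfCoffeeLoop, Nat.cast_zero]
      rw [if_true, h8]
      have : (k + 1 + (8 - 0)) / 9 = (k + (8 - 8)) / 9 + 1 := by omega
      rw [this]
      push_cast
      ring
    · have hc1 : ((c : Int)) ≠ 0 := by exact_mod_cast h0
      have hpred := ih (price := price + p) (c - 1) (by omega)
      simp only [getCostOfCoffeeLoop, if_neg hc1]
      have hcast : (c : Int) - 1 = ((c - 1 : Nat) : Int) := by omega
      rw [hcast, hpred]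
      have : (k + 1 + (8 - c)) / 9 = (k + (8 - (c - 1))) / 9 := by omega
      rw [this]
      push_cast
      ring

-- ===== VERDICT (by name: the statement is the Claim_ definition above) =====
theorem getCostOfCoffee_spec : Claim_equal_getCostOfCoffee := by
  intro n p _ hpre
  unfold Spec_getCostOfCoffee getCostOfCoffee getCostOfCoffee_alt
  have h := getCostOfCoffeeLoop_eq n.toNat p 0 8 (by omega)
  rw [show ((8 : Nat) : Int) = (8 : Int) by norm_num] at h
  rw [h]
  have hfd : PySem.Int.floordiv n 9 = n / 9 :=
    PySem.Int.floordiv_eq_ediv_of_pos (by norm_num)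
  have hn : ((n.toNat : Int)) = n := Int.toNat_of_nonneg hpre
  have hdiv : (((n.toNat + (8 - 8)) / 9 : Nat) : Int) = n / 9 := by
    omega
  rw [hfd, hn, hdiv]
  ring
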